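-- pv_equiv track=rewrite | github.com/NYU-willsterJ/Database-Project | instruction_parser.py | __where_condition
-- ===== SOURCE A (Python) =====
-- def __where_condition(s):
--     left_s = ''
--     right_s = ''
--     op = ''
--     for c in s:
--         if (c.isalnum() or c == '.' or c == '_') and op == '':
--             left_s += c
--         elif not c.isalnum() and right_s == '':
--             op += c
--         else:
--             right_s += c
--     return left_s, op, right_s
-- ===== SOURCE B (Python) =====
-- def __where_condition(s):
--     n = len(s)
--     i1 = n
--     for i in range(n):
--         c = s[i]
--         if not (c.isalnum() or c == '.' or c == '_'):
--             i1 = i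
--             break
--     i2 = n
--     for i in range(i1, n):
--         if s[i].isalnum():
--             i2 = i
--             break
--     return s[:i1], s[i1:i2], s[i2:]
-- ===== Notes on version B (the rewrite author's own statement) =====
-- stated objective: alternative
-- what changed: B computes two boundary indices (end of the alnum/dot/underscore prefix, then the next alphanumeric index) and returns three slices of s, instead of A's single pass that appends every character to one of three accumulator strings depending on mutable state.
import Mathlib
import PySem

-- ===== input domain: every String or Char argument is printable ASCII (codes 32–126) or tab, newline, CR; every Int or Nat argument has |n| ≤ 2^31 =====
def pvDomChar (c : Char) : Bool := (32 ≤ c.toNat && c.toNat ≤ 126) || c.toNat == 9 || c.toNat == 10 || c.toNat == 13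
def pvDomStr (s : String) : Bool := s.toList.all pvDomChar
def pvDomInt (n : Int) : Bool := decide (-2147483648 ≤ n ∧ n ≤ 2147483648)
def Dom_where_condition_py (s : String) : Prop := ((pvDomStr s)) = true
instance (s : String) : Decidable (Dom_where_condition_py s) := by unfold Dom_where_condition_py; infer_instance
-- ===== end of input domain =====

-- B finds the two phase-boundary indices and returns three slices of s, instead of A's
-- stateful accumulate-into-three-strings pass (alternative decomposition, same cost).


-- ===== PORT A =====
-- one step of A's for-loop over the characters; state is (left_s, op, right_s)
def pvStepA (st : String × String × String) (c : Char) : String × String × String :=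
  if (PySem.Chars.isalnum c || c == '.' || c == '_') && st.2.1 == "" then
    (st.1.push c, st.2.1, st.2.2)
  else if !PySem.Chars.isalnum c && st.2.2 == "" then
    (st.1, st.2.1.push c, st.2.2)
  else
    (st.1, st.2.1, st.2.2.push c)

def where_condition_py (s : String) : String × String × String :=
  s.toList.foldl pvStepA ("", "", "")

-- ===== PORT B =====
-- first index whose char is NOT alnum/'.'/'_' (length if none) — B's first loop
def pvFindNotL : List Char → Nat
  | [] => 0
  | c :: cs => if PySem.Chars.isalnum c || c == '.' || c == '_' then 1 + pvFindNotL cs else 0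

-- offset of the first alphanumeric char (length if none) — B's second loop
def pvFindAl : List Char → Nat
  | [] => 0
  | c :: cs => if PySem.Chars.isalnum c then 0 else 1 + pvFindAl cs

def where_condition_py_alt (s : String) : String × String × String :=
  let cs := s.toList
  let i1 := pvFindNotL cs
  let i2 := i1 + pvFindAl (cs.drop i1)
  (String.ofList (cs.take i1), String.ofList ((cs.drop i1).take (i2 - i1)), String.ofList (cs.drop i2))

-- ===== PRECONDITION & SPEC =====
def Spec_where_condition_py (s : String) (out : String × String × String) : Prop := out = where_condition_py_alt s
instance (s : String) (out : String × String × String) : Decidable (Spec_where_condition_py s out) := by unfold Spec_where_condition_py; infer_instance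

-- ===== CLAIM (what is proved, stated in full; the proofs are below) =====
def Claim_equal_where_condition_py : Prop := ∀ (s : String), Dom_where_condition_py s → Spec_where_condition_py s (where_condition_py s)

-- ===== LEMMAS AND PROOFS =====

theorem pvEmpty_eq : ("" : String) = String.ofList [] :=
  String.toList_inj.mp (by simp)

theorem pvOfList_push (l : List Char) (c : Char) :
    (String.ofList l).push c = String.ofList (l ++ [c]) :=
  String.toList_inj.mp (by simp)

theorem pvPush_empty (c : Char) : ("" : String).push c = String.ofList [c] :=
  String.toList_inj.mp (by simp)

theorem pvOfList_beq_empty (l : List Char) : (String.ofList l == "") = l.isEmpty := by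
  cases l with
  | nil => simp
  | cons c cs =>
    simp only [List.isEmpty_cons, beq_eq_false_iff_ne]
    intro h
    have : (c :: cs : List Char) = [] := by
      simpa using String.toList_inj.mpr (h.trans pvEmpty_eq)
    simp at this

-- phase 3: op and right_s nonempty — every remaining char goes to right_s
theorem pvPhase3 :
    ∀ (cs ls os rs : List Char), os ≠ [] → rs ≠ [] →
      cs.foldl pvStepA (String.ofList ls, String.ofList os, String.ofList rs)
        = (String.ofList ls, String.ofList os, String.ofList (rs ++ cs)) := by
  intro cs
  induction cs with
  | nil => intro ls os rs _ _; simp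
  | cons c cs ih =>
    intro ls os rs hos hrs
    have hosb : os.isEmpty = false := by simpa using hos
    have hrsb : rs.isEmpty = false := by simpa using hrs
    simp only [List.foldl_cons, pvStepA, pvOfList_beq_empty, hosb, hrsb, Bool.and_false,
      Bool.false_eq_true, if_false, pvOfList_push]
    rw [ih ls os (rs ++ [c]) hos (by simp)]
    simp

-- phase 2: op nonempty, right_s empty — non-alnum chars extend op until the first alnum char
theorem pvPhase2 : ∀ (cs ls os : List Char), os ≠ [] →
    cs.foldl pvStepA (String.ofList ls, String.ofList os, "") =
      (String.ofList ls, String.ofList (os ++ cs.take (pvFindAl cs)),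
       String.ofList (cs.drop (pvFindAl cs))) := by
  intro cs
  induction cs with
  | nil => intro ls os _; simp [pvFindAl]
  | cons c cs ih =>
    intro ls os hos
    have hosb : os.isEmpty = false := by simpa using hos
    by_cases hal : PySem.Chars.isalnum c = true
    · simp only [List.foldl_cons, pvStepA, pvOfList_beq_empty, hosb, Bool.and_false,
        Bool.false_eq_true, if_false, hal, Bool.not_true, Bool.false_and, pvPush_empty]
      rw [pvPhase3 cs ls os [c] hos (by simp)]
      simp [pvFindAl, hal]
    · have hal' : PySem.Chars.isalnum c = false := by simpa using hal
      simp only [List.foldl_cons, pvStepA, pvOfList_beq_empty, hosb, Bool.and_false,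
        Bool.false_eq_true, if_false, hal', Bool.not_false, Bool.true_and, beq_self_eq_true,
        if_true, pvOfList_push]
      rw [ih ls (os ++ [c]) (by simp)]
      simp [pvFindAl, hal', Nat.add_comm 1 (pvFindAl cs)]

-- phase 1: op and right_s empty — left-class chars extend left_s
theorem pvPhase1 : ∀ (cs ls : List Char),
    cs.foldl pvStepA (String.ofList ls, "", "") =
      (String.ofList (ls ++ cs.take (pvFindNotL cs)),
       String.ofList ((cs.drop (pvFindNotL cs)).take (pvFindAl (cs.drop (pvFindNotL cs)))),
       String.ofList ((cs.drop (pvFindNotL cs)).drop (pvFindAl (cs.drop (pvFindNotL cs))))) := by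
  intro cs
  induction cs with
  | nil => intro ls; simp [pvFindNotL, pvFindAl]
  | cons c cs ih =>
    intro ls
    by_cases hcl : (PySem.Chars.isalnum c || c == '.' || c == '_') = true
    · simp only [List.foldl_cons, pvStepA, hcl, beq_self_eq_true, Bool.and_true, if_true,
        pvOfList_push]
      rw [ih (ls ++ [c])]
      simp [pvFindNotL, hcl, Nat.add_comm 1 (pvFindNotL cs)]
    · have hcl' : (PySem.Chars.isalnum c || c == '.' || c == '_') = false := by simpa using hcl
      obtain ⟨hal, hd, hu⟩ : PySem.Chars.isalnum c = false ∧ (c == '.') = false ∧ (c == '_') = false := by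
        simpa [Bool.or_eq_false_iff, and_assoc] using hcl'
      simp only [List.foldl_cons, pvStepA, hal, hd, hu, Bool.false_or, Bool.or_false,
        Bool.false_and, Bool.false_eq_true, if_false, Bool.not_false, Bool.true_and,
        beq_self_eq_true, if_true, pvPush_empty]
      rw [pvPhase2 cs ls [c] (by simp)]
      simp [pvFindNotL, pvFindAl, hal, hd, hu, Nat.add_comm 1 (pvFindAl cs)]

-- ===== VERDICT (by name: the statement is the Claim_ definition above) =====
theorem where_condition_py_spec : Claim_equal_where_condition_py := by
  intro s _
  unfold Spec_where_condition_py where_condition_py where_condition_py_alt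
  rw [show ("" : String) = String.ofList [] from pvEmpty_eq, pvPhase1 s.toList []]
  simp [List.drop_drop, Nat.add_comm]
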